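-- pv_equiv track=rewrite | github.com/tarunms7/forge-orchestrator | forge/core/daemon.py | _classify_pipeline_result
-- ===== SOURCE A (Python) =====
-- def _classify_pipeline_result(task_states: list[str]) -> str:
--     """Classify pipeline outcome from terminal task states."""
--     active_states = [s for s in task_states if s != "cancelled"]
--     if not active_states:
--         return "complete"
--     done_count = sum(1 for s in active_states if s == "done")
--     blocked_count = sum(1 for s in active_states if s == "blocked")
--     if done_count == len(active_states):
--         return "complete"
--     # All remaining tasks are either done or blocked — partial success if
--     # at least one task completed.
--     if done_count + blocked_count == len(active_states) and done_count > 0: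
--         return "partial_success"
--     if done_count == 0:
--         return "error"
--     return "partial_success"
-- ===== SOURCE B (Python) =====
-- def _classify_pipeline_result(task_states: list[str]) -> str:
--     """Classify pipeline outcome from terminal task states."""
--     active = {s for s in task_states if s != "cancelled"}
--     if active <= {"done"}:
--         return "complete"
--     return "partial_success" if "done" in active else "error"
-- ===== Notes on version B (the rewrite author's own statement) =====
-- stated objective: simpler
-- what changed: Replaces the filtered list plus two count accumulations and four counted branches by a set of active states with a single subset test and a membership test.
import Mathlib
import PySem

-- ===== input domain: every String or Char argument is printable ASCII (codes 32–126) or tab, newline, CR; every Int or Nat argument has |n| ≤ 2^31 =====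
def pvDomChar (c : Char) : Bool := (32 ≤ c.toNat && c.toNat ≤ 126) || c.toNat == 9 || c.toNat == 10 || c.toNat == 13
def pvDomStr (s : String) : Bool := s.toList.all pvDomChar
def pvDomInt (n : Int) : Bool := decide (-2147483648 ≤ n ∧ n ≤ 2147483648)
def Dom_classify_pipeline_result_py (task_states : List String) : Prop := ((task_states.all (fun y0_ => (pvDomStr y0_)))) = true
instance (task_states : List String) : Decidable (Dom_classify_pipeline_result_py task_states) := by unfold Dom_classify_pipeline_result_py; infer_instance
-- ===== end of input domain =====

-- B replaces the filtered list, two counts and four branches by one set with a subset test and a membership test (simpler; same cost).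


-- ===== PORT A =====
def classify_pipeline_result_py (task_states : List String) : String :=
  let active_states := task_states.filter (fun s => s != "cancelled")
  if active_states = [] then "complete"
  else
    let done_count := active_states.countP (fun s => s == "done")
    let blocked_count := active_states.countP (fun s => s == "blocked")
    if done_count = active_states.length then "complete"
    else if done_count + blocked_count = active_states.length ∧ done_count > 0 then "partial_success"
    else if done_count = 0 then "error"
    else "partial_success"

-- ===== PORT B =====
def classify_pipeline_result_py_alt (task_states : List String) : String :=
  let active : PySem.Set String := PySem.Set.ofList (task_states.filter (fun s => s != "cancelled"))
  if PySem.Set.issubset active ["done"] then "complete"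
  else if PySem.Set.contains active "done" then "partial_success"
  else "error"

-- ===== PRECONDITION & SPEC =====
def Spec_classify_pipeline_result_py (task_states : List String) (out : String) : Prop := out = classify_pipeline_result_py_alt task_states
instance (task_states : List String) (out : String) : Decidable (Spec_classify_pipeline_result_py task_states out) := by unfold Spec_classify_pipeline_result_py; infer_instance

-- ===== CLAIM (what is proved, stated in full; the proofs are below) =====
def Claim_equal_classify_pipeline_result_py : Prop := ∀ (task_states : List String), Dom_classify_pipeline_result_py task_states → Spec_classify_pipeline_result_py task_states (classify_pipeline_result_py task_states)

-- ===== LEMMAS AND PROOFS =====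

-- B's subset test holds iff every active state is "done".
theorem issubset_done_iff (l : List String) :
    PySem.Set.issubset (PySem.Set.ofList l) ["done"] = true ↔ ∀ x ∈ l, x = "done" := by
  rw [PySem.Set.issubset_iff]
  constructor
  · intro h x hx
    have := h x ((PySem.Set.mem_ofList l x).mpr hx)
    simpa using this
  · intro h x hx
    have := h x ((PySem.Set.mem_ofList l x).mp hx)
    simp [this]

theorem contains_done_iff (l : List String) :
    PySem.Set.contains (PySem.Set.ofList l) "done" = true ↔ "done" ∈ l := by
  rw [PySem.Set.contains_iff, PySem.Set.mem_ofList]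

theorem countP_done_eq_length_iff (l : List String) :
    l.countP (fun s => s == "done") = l.length ↔ ∀ x ∈ l, x = "done" := by
  rw [List.countP_eq_length]
  constructor
  · intro h x hx; simpa using h x hx
  · intro h x hx; simp [h x hx]

theorem countP_done_pos_iff (l : List String) :
    0 < l.countP (fun s => s == "done") ↔ "done" ∈ l := by
  rw [List.countP_pos_iff]
  constructor
  · rintro ⟨x, hx, h⟩; simpa using (beq_iff_eq.mp h ▸ hx)
  · intro h; exact ⟨"done", h, by simp⟩

-- ===== VERDICT (by name: the statement is the Claim_ definition above) =====
theorem classify_pipeline_result_py_spec : Claim_equal_classify_pipeline_result_py := by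
  intro ts _
  unfold Spec_classify_pipeline_result_py classify_pipeline_result_py classify_pipeline_result_py_alt
  set l := ts.filter (fun s => s != "cancelled") with hl
  by_cases hnil : l = []
  · simp [hnil]
  · simp only [hnil, if_false]
    by_cases hall : ∀ x ∈ l, x = "done"
    · have hc : l.countP (fun s => s == "done") = l.length := (countP_done_eq_length_iff l).mpr hall
      have hs : PySem.Set.issubset (PySem.Set.ofList l) ["done"] = true := (issubset_done_iff l).mpr hall
      simp [hc, hs]
    · have hc : l.countP (fun s => s == "done") ≠ l.length := by
        intro h; exact hall ((countP_done_eq_length_iff l).mp h)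
      have hs : PySem.Set.issubset (PySem.Set.ofList l) ["done"] ≠ true := by
        intro h; exact hall ((issubset_done_iff l).mp h)
      simp only [hc, if_false, Bool.not_eq_true] at *
      by_cases hdone : "done" ∈ l
      · have hpos : 0 < l.countP (fun s => s == "done") := (countP_done_pos_iff l).mpr hdone
        have hcont : PySem.Set.contains (PySem.Set.ofList l) "done" = true := (contains_done_iff l).mpr hdone
        by_cases hb : l.countP (fun s => s == "done") + l.countP (fun s => s == "blocked") = l.length
        · simp [hb, hpos, hs]; exact hdone
        · simp [hb, hpos, Nat.pos_iff_ne_zero.mp hpos, hs]; exact hdone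
      · have hz : l.countP (fun s => s == "done") = 0 := by
          by_contra h
          exact hdone ((countP_done_pos_iff l).mp (Nat.pos_of_ne_zero h))
        have hcont : PySem.Set.contains (PySem.Set.ofList l) "done" ≠ true := by
          intro h; exact hdone ((contains_done_iff l).mp h)
        simp [hz, hs]
        exact hdone
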